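-- pv_equiv track=rewrite | github.com/fantauzzi/bioalg | chapter01/main.py | compute_skew
-- ===== SOURCE A (Python) =====
-- def compute_skew(genome):
--     genome = str.lower(genome)
--     skew = []
--     gc_diff_count = 0
--     for neuclotide in genome:
--         if neuclotide == 'g':
--             gc_diff_count += 1
--         elif neuclotide == 'c':
--             gc_diff_count -= 1
--         skew.append(gc_diff_count)
--     return skew
-- ===== SOURCE B (Python) =====
-- def _positions(text, target):
--     return [i for i, ch in enumerate(text) if ch == target]
--
--
-- def compute_skew(genome):
--     text = genome.lower()
--     gpos = _positions(text, 'g')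
--     cpos = _positions(text, 'c')
--     skew = []
--     gi = ci = 0
--     for i in range(len(text)):
--         if gi < len(gpos) and gpos[gi] == i:
--             gi += 1
--         if ci < len(cpos) and cpos[ci] == i:
--             ci += 1
--         skew.append(gi - ci)
--     return skew
-- ===== Notes on version B (the rewrite author's own statement) =====
-- stated objective: alternative
-- what changed: Instead of one pass keeping a running +1/-1 counter, B first extracts the sorted index lists of G and C occurrences and then merges them with two pointers, emitting at each index the difference of the counts of consumed positions.
import Mathlib
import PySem

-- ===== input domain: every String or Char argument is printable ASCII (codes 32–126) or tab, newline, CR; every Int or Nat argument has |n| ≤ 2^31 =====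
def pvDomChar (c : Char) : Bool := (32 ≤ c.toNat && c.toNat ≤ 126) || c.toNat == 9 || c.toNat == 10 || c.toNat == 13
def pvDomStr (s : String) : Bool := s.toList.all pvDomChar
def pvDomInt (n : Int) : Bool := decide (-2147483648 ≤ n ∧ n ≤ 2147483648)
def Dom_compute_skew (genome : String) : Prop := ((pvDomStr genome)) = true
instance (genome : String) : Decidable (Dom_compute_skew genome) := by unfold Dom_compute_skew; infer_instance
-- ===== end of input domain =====

-- B replaces A's single running counter by extracting the index lists of the two tracked nucleotides and merging them with two pointers (alternative algorithm, same cost).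

-- ===== PORT A =====
-- A: explicit loop keeping a gc_diff_count counter, appending it after each character.
def compute_skew (genome : String) : List Int :=
  ((PySem.Str.lower genome).toList.foldl
    (fun (st : List Int × Int) c =>
      let n : Int := if c = 'g' then st.2 + 1 else if c = 'c' then st.2 - 1 else st.2
      (st.1 ++ [n], n)) ([], 0)).1

-- ===== PORT B =====
-- [i for i, ch in enumerate(text) if ch == target]
def pyPositions (text : List Char) (target : Char) : List Int :=
  (PySem.List.enumerate text 0).filterMap (fun p => if p.2 = target then some p.1 else none)

-- the two-pointer merge loop of Source B (state: gi, ci, skew)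
def skewLoop (gpos cpos : List Int) (idxs : List Int) (st : Nat × Nat × List Int) :
    Nat × Nat × List Int :=
  idxs.foldl
    (fun st i =>
      let gi := if st.1 < gpos.length ∧ gpos.getD st.1 0 = i then st.1 + 1 else st.1
      let ci := if st.2.1 < cpos.length ∧ cpos.getD st.2.1 0 = i then st.2.1 + 1 else st.2.1
      (gi, ci, st.2.2 ++ [(gi : Int) - (ci : Int)])) st

def compute_skew_alt (genome : String) : List Int :=
  let text := (PySem.Str.lower genome).toList
  let gpos := pyPositions text 'g'
  let cpos := pyPositions text 'c'
  (skewLoop gpos cpos (PySem.List.pyRange 0 (text.length : Int) 1) (0, 0, [])).2.2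

-- ===== PRECONDITION & SPEC =====
def Spec_compute_skew (genome : String) (out : List Int) : Prop := out = compute_skew_alt genome
instance (genome : String) (out : List Int) : Decidable (Spec_compute_skew genome out) := by unfold Spec_compute_skew; infer_instance

-- ===== CLAIM (what is proved, stated in full; the proofs are below) =====
def Claim_equal_compute_skew : Prop := ∀ (genome : String), Dom_compute_skew genome → Spec_compute_skew genome (compute_skew genome)

-- ===== LEMMAS AND PROOFS =====

-- per-character delta (proof-side reference)
def skewDelta (c : Char) : Int := if c = 'g' then 1 else if c = 'c' then -1 else 0

-- reference running sum (proof-side)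
def skewAccum (acc : Int) : List Int → List Int
  | [] => []
  | d :: ds => (acc + d) :: skewAccum (acc + d) ds

-- positions of c in l, offset by k (proof-side view of pyPositions)
def posFrom (c : Char) (k : Int) : List Char → List Int
  | [] => []
  | x :: xs => if x = c then k :: posFrom c (k + 1) xs else posFrom c (k + 1) xs

theorem pyPositions_eq (c : Char) (l : List Char) (k : Int) :
    (PySem.List.enumerate l k).filterMap (fun p => if p.2 = c then some p.1 else none)
      = posFrom c k l := by
  induction l generalizing k with
  | nil => simp [PySem.List.enumerate_nil, posFrom]
  | cons x xs ih =>
      simp only [PySem.List.enumerate_cons, List.filterMap_cons, posFrom]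
      by_cases h : x = c <;> simp [h, ih]

theorem posFrom_lb (c : Char) (l : List Char) (k : Int) :
    ∀ m ∈ posFrom c k l, k ≤ m := by
  induction l generalizing k with
  | nil => simp [posFrom]
  | cons x xs ih =>
      intro m hm
      simp only [posFrom] at hm
      by_cases h : x = c
      · simp [h] at hm
        rcases hm with rfl | hm
        · exact le_refl m
        · exact le_trans (by omega) (ih (k + 1) m hm)
      · simp [h] at hm
        exact le_trans (by omega) (ih (k + 1) m hm)

theorem getD_append_len (A r : List Int) (d : Int) :
    (A ++ r).getD A.length d = r.getD 0 d := by
  induction A with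
  | nil => rfl
  | cons a as ih => simpa using ih

-- the guard is false when the pending positions are all > k
theorem skewGuard_false (C r : List Int) (k : Int) (hr : ∀ m ∈ r, k + 1 ≤ m) :
    ¬ (C.length < (C ++ r).length ∧ (C ++ r).getD C.length 0 = k) := by
  rintro ⟨h1, h2⟩
  rw [getD_append_len] at h2
  cases r with
  | nil => simp at h1
  | cons m ms =>
      have := hr m (by simp)
      simp at h2
      omega

theorem skew_step_eq (c : Char) (n : Int) :
    (if c = 'g' then n + 1 else if c = 'c' then n - 1 else n) = n + skewDelta c := by
  unfold skewDelta
  by_cases hg : c = 'g' <;> by_cases hc : c = 'c' <;> simp [hg, hc] <;> try ring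

theorem skew_foldl_eq (l : List Char) (pre : List Int) (n : Int) :
    (l.foldl
      (fun (st : List Int × Int) c =>
        let m : Int := if c = 'g' then st.2 + 1 else if c = 'c' then st.2 - 1 else st.2
        (st.1 ++ [m], m)) (pre, n)).1 = pre ++ skewAccum n (l.map skewDelta) := by
  induction l generalizing pre n with
  | nil => simp [skewAccum]
  | cons c cs ih =>
      simp only [List.foldl_cons, List.map_cons, skewAccum, skew_step_eq c n]
      rw [ih]
      simp

theorem skewLoop_nil (g c : List Int) (st : Nat × Nat × List Int) :
    skewLoop g c [] st = st := rfl

theorem skewLoop_cons (g c : List Int) (i : Int) (idxs : List Int) (gi ci : Nat) (acc : List Int) :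
    skewLoop g c (i :: idxs) (gi, ci, acc) =
      skewLoop g c idxs
        ((if gi < g.length ∧ g.getD gi 0 = i then gi + 1 else gi),
         (if ci < c.length ∧ c.getD ci 0 = i then ci + 1 else ci),
         acc ++
           [((if gi < g.length ∧ g.getD gi 0 = i then gi + 1 else gi : Nat) : Int) -
            ((if ci < c.length ∧ c.getD ci 0 = i then ci + 1 else ci : Nat) : Int)]) := rfl

theorem skewLoop_eq (l : List Char) (k : Int) (G C out : List Int) :
    (skewLoop (G ++ posFrom 'g' k l) (C ++ posFrom 'c' k l)
        (PySem.List.pyRange k (k + l.length) 1) (G.length, C.length, out)).2.2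
      = out ++ skewAccum ((G.length : Int) - C.length) (l.map skewDelta) := by
  induction l generalizing k G C out with
  | nil =>
      have h0 : PySem.List.pyRange k (k + (([] : List Char).length : Int)) 1 = [] := by
        simp [PySem.List.pyRange]
      rw [h0, skewLoop_nil]
      simp [skewAccum]
  | cons x xs ih =>
      have hk : k < k + ((x :: xs).length : Int) := by
        push_cast [List.length_cons]; omega
      have hrange : k + ((x :: xs).length : Int) = (k + 1) + (xs.length : Int) := by
        push_cast [List.length_cons]; ring
      rw [PySem.List.pyRange_one_cons hk, hrange, skewLoop_cons]
      by_cases hg : x = 'g'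
      · have hgpos : posFrom 'g' k (x :: xs) = k :: posFrom 'g' (k + 1) xs := by
          simp [posFrom, hg]
        have hcpos : posFrom 'c' k (x :: xs) = posFrom 'c' (k + 1) xs := by
          simp [posFrom, hg]
        rw [hgpos, hcpos]
        have hgguard : (G.length < (G ++ k :: posFrom 'g' (k + 1) xs).length ∧
            (G ++ k :: posFrom 'g' (k + 1) xs).getD G.length 0 = k) := by
          refine ⟨by simp, ?_⟩
          rw [getD_append_len]; rfl
        have hcguard := skewGuard_false C (posFrom 'c' (k + 1) xs) k (posFrom_lb 'c' xs (k + 1))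
        rw [if_pos hgguard, if_neg hcguard]
        have hGapp : G ++ k :: posFrom 'g' (k + 1) xs = (G ++ [k]) ++ posFrom 'g' (k + 1) xs := by
          simp
        have hlen : G.length + 1 = (G ++ [k]).length := by simp
        rw [hGapp, hlen,
          ih (k + 1) (G ++ [k]) C (out ++ [((G ++ [k]).length : Int) - (C.length : Int)])]
        have hv : ((G ++ [k]).length : Int) - (C.length : Int)
            = ((G.length : Int) - (C.length : Int)) + 1 := by
          push_cast [List.length_append, List.length_cons, List.length_nil]; ring
        rw [hv]
        simp [skewAccum, skewDelta, hg]
      · by_cases hc : x = 'c'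
        · have hgpos : posFrom 'g' k (x :: xs) = posFrom 'g' (k + 1) xs := by
            simp [posFrom, hg]
          have hcpos : posFrom 'c' k (x :: xs) = k :: posFrom 'c' (k + 1) xs := by
            simp [posFrom, hc]
          rw [hgpos, hcpos]
          have hgguard := skewGuard_false G (posFrom 'g' (k + 1) xs) k (posFrom_lb 'g' xs (k + 1))
          have hcguard : (C.length < (C ++ k :: posFrom 'c' (k + 1) xs).length ∧
              (C ++ k :: posFrom 'c' (k + 1) xs).getD C.length 0 = k) := by
            refine ⟨by simp, ?_⟩
            rw [getD_append_len]; rfl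
          rw [if_neg hgguard, if_pos hcguard]
          have hCapp : C ++ k :: posFrom 'c' (k + 1) xs = (C ++ [k]) ++ posFrom 'c' (k + 1) xs := by
            simp
          have hlen : C.length + 1 = (C ++ [k]).length := by simp
          rw [hCapp, hlen,
            ih (k + 1) G (C ++ [k]) (out ++ [(G.length : Int) - ((C ++ [k]).length : Int)])]
          have hv : (G.length : Int) - ((C ++ [k]).length : Int)
              = ((G.length : Int) - (C.length : Int)) + -1 := by
            push_cast [List.length_append, List.length_cons, List.length_nil]; ring
          rw [hv]
          simp [skewAccum, skewDelta, hc]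
        · have hgpos : posFrom 'g' k (x :: xs) = posFrom 'g' (k + 1) xs := by
            simp [posFrom, hg]
          have hcpos : posFrom 'c' k (x :: xs) = posFrom 'c' (k + 1) xs := by
            simp [posFrom, hc]
          rw [hgpos, hcpos]
          have hgguard := skewGuard_false G (posFrom 'g' (k + 1) xs) k (posFrom_lb 'g' xs (k + 1))
          have hcguard := skewGuard_false C (posFrom 'c' (k + 1) xs) k (posFrom_lb 'c' xs (k + 1))
          rw [if_neg hgguard, if_neg hcguard,
            ih (k + 1) G C (out ++ [(G.length : Int) - (C.length : Int)])]
          simp [skewAccum, skewDelta, hg, hc]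

-- ===== VERDICT (by name: the statement is the Claim_ definition above) =====
theorem compute_skew_spec : Claim_equal_compute_skew := by
  intro genome _
  have h := skewLoop_eq (PySem.Str.lower genome).toList 0 [] [] []
  simp only [List.nil_append, List.length_nil, Nat.cast_zero, sub_zero, zero_add] at h
  simp only [Spec_compute_skew, compute_skew, compute_skew_alt, pyPositions, pyPositions_eq]
  rw [h]
  simpa using skew_foldl_eq (PySem.Str.lower genome).toList [] 0
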